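-- pv_equiv track=rewrite | github.com/pontsoleil/xBRL-GL | scripts/csv2tidy.py | split_path_ignoring_brackets
-- ===== SOURCE A (Python) =====
-- def split_path_ignoring_brackets(path):
--     elements = []
--     current = ""
--     bracket_level = 0
--     for char in path:
--         if char == "/" and bracket_level == 0:
--             if current:
--                 elements.append(current)
--                 current = ""
--         else:
--             current += char
--             if char == "[":
--                 bracket_level += 1
--             elif char == "]":
--                 bracket_level -= 1
--     if current:
--         elements.append(current)
--     return elements
-- ===== SOURCE B (Python) =====
-- def split_path_ignoring_brackets(path):
--     # Pass 1: record indices of slashes that sit at bracket depth 0.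
--     depth = 0
--     cuts = []
--     for i, ch in enumerate(path):
--         if ch == "[":
--             depth += 1
--         elif ch == "]":
--             depth -= 1
--         elif ch == "/" and depth == 0:
--             cuts.append(i)
--     # Pass 2: slice between consecutive cut points, keeping non-empty pieces.
--     out = []
--     start = 0
--     for c in cuts + [len(path)]:
--         seg = path[start:c]
--         if seg:
--             out.append(seg)
--         start = c + 1
--     return out
-- ===== Notes on version B (the rewrite author's own statement) =====
-- stated objective: alternative
-- what changed: Replaces the single interleaved accumulate-and-flush loop by two passes: first collect the indices of depth-0 slashes, then materialise the segments by slicing between consecutive cut points.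
import Mathlib
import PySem

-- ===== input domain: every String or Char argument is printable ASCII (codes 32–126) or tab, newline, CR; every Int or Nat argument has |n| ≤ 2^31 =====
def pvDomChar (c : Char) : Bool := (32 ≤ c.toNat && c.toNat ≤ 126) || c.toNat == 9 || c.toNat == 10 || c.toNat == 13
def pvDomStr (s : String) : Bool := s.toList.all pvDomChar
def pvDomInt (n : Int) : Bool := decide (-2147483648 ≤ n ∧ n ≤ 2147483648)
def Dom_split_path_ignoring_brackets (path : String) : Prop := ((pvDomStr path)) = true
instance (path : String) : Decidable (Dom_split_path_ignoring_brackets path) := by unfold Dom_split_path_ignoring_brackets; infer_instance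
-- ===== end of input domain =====

-- B replaces A's interleaved accumulate-and-flush loop by two passes: collect the indices of
-- depth-0 slashes, then slice the string between consecutive cut points (objective: alternative).

-- ===== PORT A =====
-- state = (elements, current, bracket_level); current kept as List Char
def pvStepA (s : List String × List Char × Int) (c : Char) : List String × List Char × Int :=
  let (elems, cur, lvl) := s
  if c = '/' ∧ lvl = 0 then
    if cur ≠ [] then (elems ++ [String.ofList cur], [], lvl) else (elems, cur, lvl)
  else
    let cur' := cur ++ [c]
    let lvl' := if c = '[' then lvl + 1 else if c = ']' then lvl - 1 else lvl
    (elems, cur', lvl')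

def split_path_ignoring_brackets (path : String) : List String :=
  let st := path.toList.foldl pvStepA ([], [], 0)
  if st.2.1 ≠ [] then st.1 ++ [String.ofList st.2.1] else st.1

-- ===== PORT B =====
-- first loop of Source B: indices of '/' at depth 0 (i is the running enumerate index)
def pvCuts : List Char → Nat → Int → List Nat
  | [], _, _ => []
  | c :: rest, i, depth =>
    if c = '[' then pvCuts rest (i + 1) (depth + 1)
    else if c = ']' then pvCuts rest (i + 1) (depth - 1)
    else if c = '/' ∧ depth = 0 then i :: pvCuts rest (i + 1) depth
    else pvCuts rest (i + 1) depth

-- second loop of Source B: seg = path[start:c]  (exact: start, c are in-range Nat indices)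
def pvBuild (chars : List Char) : List Nat → Nat → List String
  | [], _ => []
  | c :: cs, start =>
    let seg := (chars.drop start).take (c - start)
    (if seg ≠ [] then [String.ofList seg] else []) ++ pvBuild chars cs (c + 1)

def split_path_ignoring_brackets_alt (path : String) : List String :=
  let chars := path.toList
  pvBuild chars (pvCuts chars 0 0 ++ [chars.length]) 0

-- ===== PRECONDITION & SPEC =====
def Spec_split_path_ignoring_brackets (path : String) (out : List String) : Prop := out = split_path_ignoring_brackets_alt path
instance (path : String) (out : List String) : Decidable (Spec_split_path_ignoring_brackets path out) := by unfold Spec_split_path_ignoring_brackets; infer_instance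

-- ===== CLAIM (what is proved, stated in full; the proofs are below) =====
def Claim_equal_split_path_ignoring_brackets : Prop := ∀ (path : String), Dom_split_path_ignoring_brackets path → Spec_split_path_ignoring_brackets path (split_path_ignoring_brackets path)

-- ===== LEMMAS AND PROOFS =====

-- common recursive specification: remaining chars, pending current, bracket level
def pvSpecRec : List Char → List Char → Int → List String
  | [], cur, _ => if cur ≠ [] then [String.ofList cur] else []
  | c :: cs, cur, lvl =>
    if c = '/' ∧ lvl = 0 then
      (if cur ≠ [] then [String.ofList cur] else []) ++ pvSpecRec cs [] lvl
    else
      pvSpecRec cs (cur ++ [c]) (if c = '[' then lvl + 1 else if c = ']' then lvl - 1 else lvl)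

-- A's fold equals the recursive spec, with the accumulated elements in front
theorem pvA_spec (chars : List Char) : ∀ (elems : List String) (cur : List Char) (lvl : Int),
    (let st := chars.foldl pvStepA (elems, cur, lvl)
     if st.2.1 ≠ [] then st.1 ++ [String.ofList st.2.1] else st.1) = elems ++ pvSpecRec chars cur lvl := by
  induction chars with
  | nil =>
    intro elems cur lvl
    simp only [List.foldl_nil, pvSpecRec]
    split <;> simp
  | cons c cs ih =>
    intro elems cur lvl
    rw [List.foldl_cons]
    by_cases h : c = '/' ∧ lvl = 0
    · by_cases hc : cur = []
      · subst hc; simp [pvStepA, h, pvSpecRec, ih]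
      · simp [pvStepA, h, hc, pvSpecRec, ih]
    · simp [pvStepA, h, pvSpecRec, ih]

-- B's build equals the recursive spec: chars = pre ++ suffix, start ≤ pre.length,
-- the pending current is pre.drop start
theorem pvB_spec (suffix : List Char) : ∀ (pre : List Char) (start : Nat) (lvl : Int),
    start ≤ pre.length →
    pvBuild (pre ++ suffix) (pvCuts suffix pre.length lvl ++ [(pre ++ suffix).length]) start
      = pvSpecRec suffix (pre.drop start) lvl := by
  induction suffix with
  | nil =>
    intro pre start lvl hs
    simp only [pvCuts, List.nil_append, List.append_nil, pvBuild, pvSpecRec]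
    rw [List.take_of_length_le (by simp)]
  | cons c cs ih =>
    intro pre start lvl hs
    have hdrop : (pre ++ c :: cs).drop start = pre.drop start ++ c :: cs :=
      List.drop_append_of_le_length hs
    have hlen : (pre.drop start).length = pre.length - start := by simp
    have hpre1 : (pre ++ [c]).length = pre.length + 1 := by simp
    have hpre2 : (pre ++ [c]) ++ cs = pre ++ c :: cs := by simp
    by_cases h : c = '/' ∧ lvl = 0
    · have hc1 : ¬ c = '[' := by rw [h.1]; decide
      have hc2 : ¬ c = ']' := by rw [h.1]; decide
      have hcuts : pvCuts (c :: cs) pre.length lvl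
          = pre.length :: pvCuts cs (pre.length + 1) lvl := by
        simp [pvCuts, h]
      have hseg : ((pre ++ c :: cs).drop start).take (pre.length - start) = pre.drop start := by
        rw [hdrop, List.take_append_of_le_length (le_of_eq hlen.symm),
            List.take_of_length_le (le_of_eq hlen)]
      have hIH := ih (pre ++ [c]) (pre.length + 1) lvl (by simp)
      rw [hpre1, hpre2, List.drop_eq_nil_of_le (by simp)] at hIH
      rw [hcuts, List.cons_append]
      simp only [pvBuild]
      rw [hseg, hIH]
      simp [pvSpecRec, h]
    · have hcuts : pvCuts (c :: cs) pre.length lvl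
          = pvCuts cs (pre.length + 1) (if c = '[' then lvl + 1 else if c = ']' then lvl - 1 else lvl) := by
        by_cases h1 : c = '['
        · simp [pvCuts, h1]
        · by_cases h2 : c = ']'
          · simp [pvCuts, h2]
          · simp [pvCuts, h1, h2, h]
      have hIH := ih (pre ++ [c]) start
          (if c = '[' then lvl + 1 else if c = ']' then lvl - 1 else lvl)
          (by simp; omega)
      rw [hpre1, hpre2, List.drop_append_of_le_length hs] at hIH
      rw [hcuts, hIH]
      simp [pvSpecRec, h]

-- ===== VERDICT (by name: the statement is the Claim_ definition above) =====
theorem split_path_ignoring_brackets_spec : Claim_equal_split_path_ignoring_brackets := by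
  intro path _
  unfold Spec_split_path_ignoring_brackets
  unfold split_path_ignoring_brackets split_path_ignoring_brackets_alt
  have hA := pvA_spec path.toList [] [] 0
  have hB := pvB_spec path.toList [] 0 0 (by simp)
  simp only [List.nil_append, List.drop_nil, List.length_nil] at hA hB
  rw [hB]
  exact hA
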